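-- pv_equiv track=rewrite | github.com/AlexeyBazanov/algorithms | sprint_1/nearest_zero.py | find_nearest_zero_distance
-- ===== SOURCE A (Python) =====
-- def find_positions_distance(position_one, position_two):
--     return abs((position_one + 1) - (position_two + 1))
--
-- def split_list(full_list):
--     half = len(full_list) // 2
--     return full_list[:half], full_list[half:]
--
-- def find_nearest_zero_distance(original_pos, zeros_positions):
--     while len(zeros_positions) > 1:
--         left_zeros_positions, right_zeros_positions = split_list(zeros_positions)
--         left_position_distance = find_positions_distance(original_pos, left_zeros_positions[-1])
--         right_position_distance = find_positions_distance(original_pos, right_zeros_positions[0])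
--
--         if left_position_distance < right_position_distance:
--             zeros_positions = left_zeros_positions
--         else:
--             zeros_positions = right_zeros_positions
--
--     return find_positions_distance(original_pos, zeros_positions[0])
-- ===== SOURCE B (Python) =====
-- def find_nearest_zero_distance(original_pos, zeros_positions):
--     if len(zeros_positions) <= 1:
--         return abs(original_pos - zeros_positions[0])
--     half = len(zeros_positions) // 2
--     left_distance = abs(original_pos - zeros_positions[half - 1])
--     right_distance = abs(original_pos - zeros_positions[half])
--     if left_distance < right_distance:
--         return find_nearest_zero_distance(original_pos, zeros_positions[:half])
--     return find_nearest_zero_distance(original_pos, zeros_positions[half:])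
-- ===== Notes on version B (the rewrite author's own statement) =====
-- stated objective: simpler
-- what changed: Replaces the mutating while-loop with the split_list/find_positions_distance helper pair by a single direct recursive function that indexes the ends of the two halves in the original list (half-1 and half) and recurses on one slice; the +1/+1 distance helper is replaced by plain abs(a-b).
import Mathlib
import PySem

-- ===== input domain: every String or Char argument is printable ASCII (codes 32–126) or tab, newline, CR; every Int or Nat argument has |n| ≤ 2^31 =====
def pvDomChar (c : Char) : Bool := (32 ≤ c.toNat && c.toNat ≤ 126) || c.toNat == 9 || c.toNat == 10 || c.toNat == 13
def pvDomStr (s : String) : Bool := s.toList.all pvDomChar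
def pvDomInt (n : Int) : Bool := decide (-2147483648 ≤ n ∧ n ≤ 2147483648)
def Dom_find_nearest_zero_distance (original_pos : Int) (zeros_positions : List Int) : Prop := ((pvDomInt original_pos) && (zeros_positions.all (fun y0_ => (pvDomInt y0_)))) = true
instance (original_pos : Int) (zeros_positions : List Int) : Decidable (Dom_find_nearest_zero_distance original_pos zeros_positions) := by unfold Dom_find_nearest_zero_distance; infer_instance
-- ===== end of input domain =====

-- B rewrites A's while-loop + helper pair as one direct recursive function (simpler decomposition; same O(n) cost).

-- ===== PORT A =====
def find_positions_distance (position_one position_two : Int) : Int :=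
  |(position_one + 1) - (position_two + 1)|

def split_list (full_list : List Int) : List Int × List Int :=
  (PySem.List.slice full_list none (some (PySem.Int.floordiv (full_list.length : Int) 2)),
   PySem.List.slice full_list (some (PySem.Int.floordiv (full_list.length : Int) 2)) none)

-- lengths of the two halves (cited by the ports' decreasing_by)
theorem split_list_lengths (l : List Int) :
    (split_list l).1.length = l.length / 2 ∧ (split_list l).2.length = l.length - l.length / 2 := by
  unfold split_list
  rw [show PySem.Int.floordiv (l.length : Int) 2 = ((l.length / 2 : Nat) : Int) from by
        exact_mod_cast PySem.Int.floordiv_natCast l.length 2]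
  rw [PySem.List.slice_to_natCast, PySem.List.slice_from_natCast]
  simp
  omega

def find_nearest_zero_distance (original_pos : Int) (zeros_positions : List Int) : Int :=
  if _h : zeros_positions.length > 1 then
    let pair := split_list zeros_positions
    let left_zeros_positions := pair.1
    let right_zeros_positions := pair.2
    let left_position_distance :=
      find_positions_distance original_pos ((PySem.List.pyGet? left_zeros_positions (-1)).getD 0)
    let right_position_distance :=
      find_positions_distance original_pos ((PySem.List.pyGet? right_zeros_positions 0).getD 0)
    if left_position_distance < right_position_distance then
      find_nearest_zero_distance original_pos left_zeros_positions
    else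
      find_nearest_zero_distance original_pos right_zeros_positions
  else
    find_positions_distance original_pos ((PySem.List.pyGet? zeros_positions 0).getD 0)
termination_by zeros_positions.length
decreasing_by
  · have := split_list_lengths zeros_positions; omega
  · have := split_list_lengths zeros_positions; omega

-- ===== PORT B =====
def find_nearest_zero_distance_alt (original_pos : Int) (zeros_positions : List Int) : Int :=
  if _h : zeros_positions.length ≤ 1 then
    |original_pos - (PySem.List.pyGet? zeros_positions 0).getD 0|
  else
    let half : Nat := zeros_positions.length / 2
    let left_distance := |original_pos - (PySem.List.pyGet? zeros_positions ((half : Int) - 1)).getD 0|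
    let right_distance := |original_pos - (PySem.List.pyGet? zeros_positions (half : Int)).getD 0|
    if left_distance < right_distance then
      find_nearest_zero_distance_alt original_pos (PySem.List.slice zeros_positions none (some (half : Int)))
    else
      find_nearest_zero_distance_alt original_pos (PySem.List.slice zeros_positions (some (half : Int)) none)
termination_by zeros_positions.length
decreasing_by
  · rw [PySem.List.slice_to_natCast]; simp [List.length_take]; omega
  · rw [PySem.List.slice_from_natCast]; simp; omega

-- ===== PRECONDITION & SPEC =====
-- Pre_ excludes exactly the empty list, on which both Pythons raise IndexError.
def Pre_find_nearest_zero_distance (original_pos : Int) (zeros_positions : List Int) : Prop :=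
  zeros_positions ≠ []
instance (original_pos : Int) (zeros_positions : List Int) : Decidable (Pre_find_nearest_zero_distance original_pos zeros_positions) := by unfold Pre_find_nearest_zero_distance; infer_instance

def pvWitness_find_nearest_zero_distance : Int × List Int := (3, [-2, 0, 5])

def Spec_find_nearest_zero_distance (original_pos : Int) (zeros_positions : List Int) (out : Int) : Prop := out = find_nearest_zero_distance_alt original_pos zeros_positions
instance (original_pos : Int) (zeros_positions : List Int) (out : Int) : Decidable (Spec_find_nearest_zero_distance original_pos zeros_positions out) := by unfold Spec_find_nearest_zero_distance; infer_instance

-- ===== CLAIM (what is proved, stated in full; the proofs are below) =====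
def Claim_equal_find_nearest_zero_distance : Prop := ∀ (original_pos : Int) (zeros_positions : List Int), Dom_find_nearest_zero_distance original_pos zeros_positions → Pre_find_nearest_zero_distance original_pos zeros_positions → Spec_find_nearest_zero_distance original_pos zeros_positions (find_nearest_zero_distance original_pos zeros_positions)

-- ===== LEMMAS AND PROOFS =====
theorem fpd_abs (a b : Int) : find_positions_distance a b = |a - b| := by
  unfold find_positions_distance; ring_nf

theorem fnzd_eq_alt (original_pos : Int) (zeros_positions : List Int) :
    find_nearest_zero_distance original_pos zeros_positions
      = find_nearest_zero_distance_alt original_pos zeros_positions := by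
  fun_induction find_nearest_zero_distance original_pos zeros_positions with
  | case1 zs hgt spl L R ld rd hcond ih =>
    have hfd : PySem.Int.floordiv ((zs.length : Int)) 2 = ((zs.length / 2 : Nat) : Int) := by
      exact_mod_cast PySem.Int.floordiv_natCast zs.length 2
    have h2 : zs.length / 2 < zs.length := by omega
    have hLeq : L = zs.take (zs.length / 2) := by
      show (split_list zs).1 = _
      unfold split_list; rw [hfd, PySem.List.slice_to_natCast]
    have hReq : R = zs.drop (zs.length / 2) := by
      show (split_list zs).2 = _
      unfold split_list; rw [hfd, PySem.List.slice_from_natCast]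
    have e1 : (zs.take (zs.length / 2)).getLast? = zs[zs.length / 2 - 1]? := by
      rw [List.getLast?_eq_getElem?]
      simp [List.length_take]
      rw [Nat.min_eq_left h2.le, List.getElem?_take_of_lt (by omega)]
    have e2 : PySem.List.pyGet? (zs.drop (zs.length / 2)) 0 = zs[zs.length / 2]? := by
      rw [show (0:Int) = ((0:Nat):Int) from rfl, PySem.List.pyGet?_natCast]
      simp
    have e3 : PySem.List.pyGet? zs (((zs.length / 2 : Nat) : Int) - 1) = zs[zs.length / 2 - 1]? := by
      rw [show (((zs.length / 2 : Nat) : Int) - 1) = ((zs.length / 2 - 1 : Nat) : Int) by omega]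
      simp
    have hc : |original_pos - (zs[zs.length / 2 - 1]?).getD 0|
        < |original_pos - (zs[zs.length / 2]?).getD 0| := by
      have h' : find_positions_distance original_pos ((PySem.List.pyGet? L (-1)).getD 0)
          < find_positions_distance original_pos ((PySem.List.pyGet? R 0).getD 0) := hcond
      rw [hLeq, hReq, fpd_abs, fpd_abs, PySem.List.pyGet?_neg_one, e1, e2] at h'
      exact h'
    rw [hLeq] at ih ⊢
    rw [ih]
    conv_rhs => rw [find_nearest_zero_distance_alt]
    rw [dif_neg (by omega : ¬ zs.length ≤ 1)]
    simp only [e3, PySem.List.pyGet?_natCast, PySem.List.slice_to_natCast,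
      PySem.List.slice_from_natCast]
    rw [if_pos hc]
  | case2 zs hgt spl L R ld rd hcond ih =>
    have hfd : PySem.Int.floordiv ((zs.length : Int)) 2 = ((zs.length / 2 : Nat) : Int) := by
      exact_mod_cast PySem.Int.floordiv_natCast zs.length 2
    have h2 : zs.length / 2 < zs.length := by omega
    have hLeq : L = zs.take (zs.length / 2) := by
      show (split_list zs).1 = _
      unfold split_list; rw [hfd, PySem.List.slice_to_natCast]
    have hReq : R = zs.drop (zs.length / 2) := by
      show (split_list zs).2 = _
      unfold split_list; rw [hfd, PySem.List.slice_from_natCast]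
    have e1 : (zs.take (zs.length / 2)).getLast? = zs[zs.length / 2 - 1]? := by
      rw [List.getLast?_eq_getElem?]
      simp [List.length_take]
      rw [Nat.min_eq_left h2.le, List.getElem?_take_of_lt (by omega)]
    have e2 : PySem.List.pyGet? (zs.drop (zs.length / 2)) 0 = zs[zs.length / 2]? := by
      rw [show (0:Int) = ((0:Nat):Int) from rfl, PySem.List.pyGet?_natCast]
      simp
    have e3 : PySem.List.pyGet? zs (((zs.length / 2 : Nat) : Int) - 1) = zs[zs.length / 2 - 1]? := by
      rw [show (((zs.length / 2 : Nat) : Int) - 1) = ((zs.length / 2 - 1 : Nat) : Int) by omega]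
      simp
    have hc : ¬ |original_pos - (zs[zs.length / 2 - 1]?).getD 0|
        < |original_pos - (zs[zs.length / 2]?).getD 0| := by
      have h' : ¬ find_positions_distance original_pos ((PySem.List.pyGet? L (-1)).getD 0)
          < find_positions_distance original_pos ((PySem.List.pyGet? R 0).getD 0) := hcond
      rw [hLeq, hReq, fpd_abs, fpd_abs, PySem.List.pyGet?_neg_one, e1, e2] at h'
      exact h'
    rw [hReq] at ih ⊢
    rw [ih]
    conv_rhs => rw [find_nearest_zero_distance_alt]
    rw [dif_neg (by omega : ¬ zs.length ≤ 1)]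
    simp only [e3, PySem.List.pyGet?_natCast, PySem.List.slice_to_natCast,
      PySem.List.slice_from_natCast]
    rw [if_neg hc]
  | case3 zs hle =>
    rw [find_nearest_zero_distance_alt, dif_pos (by omega : zs.length ≤ 1), fpd_abs]

-- ===== VERDICT (by name: the statement is the Claim_ definition above) =====
theorem find_nearest_zero_distance_spec : Claim_equal_find_nearest_zero_distance := by
  intro p zs _ _
  exact fnzd_eq_alt p zs
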